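-- pv_equiv track=rewrite | github.com/MrBrantCode/unitest_baseline | mut_generate/mist_train_cf/cf_86235/solution.py | longest_consecutive_uppercase
-- ===== SOURCE A (Python) =====
-- def longest_consecutive_uppercase(string):
--     max_len = 0
--     curr_len = 0
--     max_start = 0
--     curr_start = 0
--     vowels = {'a', 'e', 'i', 'o', 'u', 'A', 'E', 'I', 'O', 'U'}
--
--     for i in range(len(string)):
--         if string[i].isupper() and string[i] not in vowels:
--             curr_len += 1
--             if curr_len == 1:
--                 curr_start = i
--             if curr_len > max_len:
--                 max_len = curr_len
--                 max_start = curr_start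
--         else:
--             curr_len = 0
--
--     return string[max_start: max_start + max_len]
-- ===== SOURCE B (Python) =====
-- def longest_consecutive_uppercase(string):
--     best = ''
--     i, n = 0, len(string)
--     while i < n:
--         if string[i].isupper() and string[i] not in 'aeiouAEIOU':
--             j = i + 1
--             while j < n and string[j].isupper() and string[j] not in 'aeiouAEIOU':
--                 j += 1
--             if j - i > len(best):
--                 best = string[i:j]
--             i = j
--         else:
--             i += 1
--     return best
-- ===== Notes on version B (the rewrite author's own statement) =====
-- stated objective: alternative
-- what changed: Replaces A's per-character state machine (curr_len/curr_start/max_len/max_start indices, then a final slice) with a two-pointer span scan that extracts each maximal run as a string and keeps the first strictly-longest run directly.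
import Mathlib
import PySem

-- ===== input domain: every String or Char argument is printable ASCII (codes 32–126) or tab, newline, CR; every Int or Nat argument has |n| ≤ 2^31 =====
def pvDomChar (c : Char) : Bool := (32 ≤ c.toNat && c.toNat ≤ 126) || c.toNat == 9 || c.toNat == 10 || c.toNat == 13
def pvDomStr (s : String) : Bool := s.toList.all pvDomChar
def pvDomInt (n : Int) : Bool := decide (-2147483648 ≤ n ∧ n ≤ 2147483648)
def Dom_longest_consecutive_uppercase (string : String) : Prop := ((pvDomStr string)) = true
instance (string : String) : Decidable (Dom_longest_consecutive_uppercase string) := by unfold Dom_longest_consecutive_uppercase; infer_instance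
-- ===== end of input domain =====

-- B replaces A's per-character curr_len/max_start state machine with a two-pointer span scan
-- that extracts whole runs and keeps the first strictly-longest run string (objective: alternative).

-- ===== PORT A =====
-- string[i].isupper() and string[i] not in {'a','e','i','o','u','A','E','I','O','U'}
def pvUpNonVowelA (c : Char) : Bool :=
  PySem.Chars.isupper c && !(['a','e','i','o','u','A','E','I','O','U'].contains c)

-- the for-loop: state (maxLen, currLen, maxStart, currStart), index i
def pvLoopA : List Char → Nat → Nat → Nat → Nat → Nat → Nat × Nat
  | [], _, maxLen, _, maxStart, _ => (maxLen, maxStart)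
  | c :: cs, i, maxLen, currLen, maxStart, currStart =>
    if pvUpNonVowelA c then
      let currLen' := currLen + 1
      let currStart' := if currLen' = 1 then i else currStart
      if currLen' > maxLen then
        pvLoopA cs (i + 1) currLen' currLen' currStart' currStart'
      else
        pvLoopA cs (i + 1) maxLen currLen' maxStart currStart'
    else
      pvLoopA cs (i + 1) maxLen 0 maxStart currStart

def longest_consecutive_uppercase (string : String) : String :=
  let l := string.toList
  let st := pvLoopA l 0 0 0 0 0
  -- string[max_start : max_start + max_len]
  String.ofList (PySem.List.slice l (some (st.2 : Int)) (some ((st.2 : Int) + (st.1 : Int))))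

-- ===== PORT B =====
-- string[i].isupper() and string[i] not in 'aeiouAEIOU'
def pvKeyB (c : Char) : Bool :=
  PySem.Chars.isupper c && !("aeiouAEIOU".toList.contains c)

-- outer while-loop; at a key char, the inner while advances j past the run
-- (= takeWhile/dropWhile split), best replaced only when strictly longer
def pvScanB : List Char → List Char → List Char
  | [], best => best
  | c :: cs, best =>
    if pvKeyB c then
      let r := List.takeWhile pvKeyB (c :: cs)
      pvScanB (List.dropWhile pvKeyB (c :: cs))
        (if r.length > best.length then r else best)
    else
      pvScanB cs best
termination_by l _ => l.length
decreasing_by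
  · simpa [List.dropWhile, *] using
      Nat.lt_succ_of_le (List.length_dropWhile_le pvKeyB cs)
  · simp

def longest_consecutive_uppercase_alt (string : String) : String :=
  String.ofList (pvScanB string.toList [])

-- ===== PRECONDITION & SPEC =====
def Spec_longest_consecutive_uppercase (string : String) (out : String) : Prop := out = longest_consecutive_uppercase_alt string
instance (string : String) (out : String) : Decidable (Spec_longest_consecutive_uppercase string out) := by unfold Spec_longest_consecutive_uppercase; infer_instance

-- ===== CLAIM (what is proved, stated in full; the proofs are below) =====
def Claim_equal_longest_consecutive_uppercase : Prop := ∀ (string : String), Dom_longest_consecutive_uppercase string → Spec_longest_consecutive_uppercase string (longest_consecutive_uppercase string)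

-- ===== LEMMAS AND PROOFS =====

-- the two predicates are the same function
theorem pvKey_eq : pvKeyB = pvUpNonVowelA := by
  funext c
  simp [pvKeyB, pvUpNonVowelA]

-- A's loop seen run-by-run (proof-side helper)
def pvRunsA : List Char → Nat → Nat → Nat → Nat × Nat
  | [], _, ml, ms => (ml, ms)
  | c :: cs, i, ml, ms =>
    if pvUpNonVowelA c then
      let k := (List.takeWhile pvUpNonVowelA (c :: cs)).length
      pvRunsA (List.dropWhile pvUpNonVowelA (c :: cs)) (i + k)
        (if k > ml then k else ml) (if k > ml then i else ms)
    else
      pvRunsA cs (i + 1) ml ms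
termination_by l _ _ _ => l.length
decreasing_by
  · simpa [List.dropWhile, *] using
      Nat.lt_succ_of_le (List.length_dropWhile_le pvUpNonVowelA cs)
  · simp

-- unfolding equations for the run-by-run helpers (wf recursion)
theorem pvRunsA_nil (i ml ms : Nat) : pvRunsA [] i ml ms = (ml, ms) := by
  simp [pvRunsA]

theorem pvRunsA_cons_pos (c : Char) (cs : List Char) (i ml ms : Nat)
    (hc : pvUpNonVowelA c = true) :
    pvRunsA (c :: cs) i ml ms
      = pvRunsA (List.dropWhile pvUpNonVowelA (c :: cs))
          (i + (List.takeWhile pvUpNonVowelA (c :: cs)).length)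
          (if (List.takeWhile pvUpNonVowelA (c :: cs)).length > ml
            then (List.takeWhile pvUpNonVowelA (c :: cs)).length else ml)
          (if (List.takeWhile pvUpNonVowelA (c :: cs)).length > ml then i else ms) := by
  rw [pvRunsA]
  simp [hc]

theorem pvRunsA_cons_neg (c : Char) (cs : List Char) (i ml ms : Nat)
    (hc : pvUpNonVowelA c = false) :
    pvRunsA (c :: cs) i ml ms = pvRunsA cs (i + 1) ml ms := by
  rw [pvRunsA]
  simp [hc]

theorem pvScanB_nil (best : List Char) : pvScanB [] best = best := by
  simp [pvScanB]

theorem pvScanB_cons_pos (c : Char) (cs : List Char) (best : List Char)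
    (hc : pvKeyB c = true) :
    pvScanB (c :: cs) best
      = pvScanB (List.dropWhile pvKeyB (c :: cs))
          (if (List.takeWhile pvKeyB (c :: cs)).length > best.length
            then List.takeWhile pvKeyB (c :: cs) else best) := by
  rw [pvScanB]
  simp [hc]

theorem pvScanB_cons_neg (c : Char) (cs : List Char) (best : List Char)
    (hc : pvKeyB c = false) :
    pvScanB (c :: cs) best = pvScanB cs best := by
  rw [pvScanB]
  simp [hc]

-- processing the inside of a run (currLen ≥ 1, so currStart never changes)
theorem pvLoopA_run (R : List Char) : ∀ (rest : List Char) (i ml oldms cst cl : Nat),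
    R.all pvUpNonVowelA = true → 1 ≤ cl →
    pvLoopA (R ++ rest) i (max ml cl) cl (if ml < cl then cst else oldms) cst
      = pvLoopA rest (i + R.length) (max ml (cl + R.length)) (cl + R.length)
          (if ml < cl + R.length then cst else oldms) cst := by
  induction R with
  | nil => intro rest i ml oldms cst cl _ _; simp
  | cons c R ih =>
    intro rest i ml oldms cst cl hall hcl
    simp only [List.all_cons, Bool.and_eq_true] at hall
    have h1 : ¬ (cl + 1 = 1) := by omega
    by_cases hgt : cl + 1 > max ml cl
    · have hml : ml < cl + 1 := by omega
      have hmax : max ml (cl + 1) = cl + 1 := by omega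
      simp only [List.cons_append, pvLoopA, hall.1, if_true, if_neg h1, if_pos hgt]
      have hih := ih rest (i + 1) ml oldms cst (cl + 1) hall.2 (by omega)
      rw [hmax, if_pos hml] at hih
      have e1 : i + 1 + R.length = i + (R.length + 1) := by omega
      have e2 : cl + 1 + R.length = cl + (R.length + 1) := by omega
      rw [e1, e2] at hih
      simpa using hih
    · have hml : ¬ ml < cl + 1 := by omega
      have hml' : ¬ ml < cl := by omega
      have hmax : max ml cl = ml := by omega
      have hmax1 : max ml (cl + 1) = ml := by omega
      simp only [List.cons_append, pvLoopA, hall.1, if_true, if_neg h1, hmax, if_neg hml']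
      have hih := ih rest (i + 1) ml oldms cst (cl + 1) hall.2 (by omega)
      rw [hmax1, if_neg hml] at hih
      have e1 : i + 1 + R.length = i + (R.length + 1) := by omega
      have e2 : cl + 1 + R.length = cl + (R.length + 1) := by omega
      rw [e1, e2] at hih
      rw [if_neg (show ¬ cl + 1 > ml by omega)]
      simpa using hih

-- A's per-character loop (fresh current run) equals the run-by-run fold
theorem pvLoopA_eq_runsA_fuel : ∀ (n : Nat) (l : List Char), l.length ≤ n → ∀ (i ml ms cst : Nat),
    pvLoopA l i ml 0 ms cst = pvRunsA l i ml ms := by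
  intro n
  induction n with
  | zero =>
    intro l hlen i ml ms cst
    have : l = [] := List.length_eq_zero_iff.mp (Nat.le_zero.mp hlen)
    subst this; simp [pvLoopA, pvRunsA]
  | succ n ihn =>
    intro l hlen
    have ih : ∀ (l' : List Char), l'.length < l.length → ∀ (i ml ms cst : Nat),
        pvLoopA l' i ml 0 ms cst = pvRunsA l' i ml ms := by
      intro l' hl'
      exact ihn l' (by omega)
    match l with
    | [] => intro i ml ms cst; simp [pvLoopA, pvRunsA_nil]
    | c :: cs =>
      intro i ml ms cst
      by_cases hc : pvUpNonVowelA c = true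
      · -- first char of a run: currLen 0 → 1, currStart := i
        have htw : List.takeWhile pvUpNonVowelA (c :: cs) = c :: List.takeWhile pvUpNonVowelA cs := by
          simp [List.takeWhile, hc]
        have hdw : List.dropWhile pvUpNonVowelA (c :: cs) = List.dropWhile pvUpNonVowelA cs := by
          simp [List.dropWhile, hc]
        set R := List.takeWhile pvUpNonVowelA cs with hR
        set rest := List.dropWhile pvUpNonVowelA cs with hrest
        have hsplit : cs = R ++ rest := (List.takeWhile_append_dropWhile).symm
        have hallR : R.all pvUpNonVowelA = true := by
          simp only [List.all_eq_true]
          intro x hx; exact List.mem_takeWhile_imp hx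
        have h1 : pvLoopA (c :: cs) i ml 0 ms cst
            = pvLoopA (R ++ rest) (i + 1) (max ml 1) 1 (if ml < 1 then i else ms) i := by
          by_cases hg : 1 > ml
          · have : max ml 1 = 1 := by omega
            simp [pvLoopA, hc, hg, this, hsplit]
          · have : max ml 1 = ml := by omega
            simp [pvLoopA, hc, hg, this, hsplit]
        rw [h1, pvLoopA_run R rest (i + 1) ml ms i 1 hallR (le_refl 1)]
        -- state after the whole run of length k = 1 + R.length
        set k := 1 + R.length with hk
        have hklen : (List.takeWhile pvUpNonVowelA (c :: cs)).length = k := by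
          rw [htw]; simp [hk, hR]; omega
        have hms : (if ml < k then i else ms) = (if k > ml then i else ms) := by
          by_cases h : ml < k <;> simp [h]
        have hml : max ml k = (if k > ml then k else ml) := by
          by_cases h : k > ml <;> simp [h] <;> omega
        -- now compare with pvRunsA on rest
        rw [pvRunsA_cons_pos c cs i ml ms hc, hklen, hdw]
        cases hrest2 : rest with
        | nil =>
          simp only [pvLoopA, pvRunsA_nil]
          rw [hms, hml]
        | cons c' cs' =>
          have hc' : pvUpNonVowelA c' = false := by
            have h0 := List.head?_dropWhile_not pvUpNonVowelA cs
            rw [← hrest, hrest2] at h0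
            simpa using h0
          have hlen2 : cs'.length < (c :: cs).length := by
            have h0 : rest.length ≤ cs.length := by
              rw [hrest]; exact List.length_dropWhile_le _ _
            rw [hrest2] at h0; simp at h0 ⊢; omega
          simp only [pvLoopA, hc', Bool.false_eq_true, if_false]
          rw [ih cs' hlen2, pvRunsA_cons_neg c' cs' (i + k) _ _ hc', hml, hms]
          have : i + 1 + R.length + 1 = i + k + 1 := by omega
          rw [this]
      · simp only [pvLoopA]
        rw [pvRunsA_cons_neg c cs i ml ms (by simpa using hc), if_neg hc]
        exact ih cs (by simp) (i + 1) ml ms cst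

-- the run-by-run fold computes (over slices of the full list) exactly B's scan
theorem pvRunsA_eq_scanB_fuel (FULL : List Char) : ∀ (n : Nat) (l : List Char), l.length ≤ n →
    ∀ (i ml ms : Nat) (best : List Char),
    l = FULL.drop i → ml = best.length → best = (FULL.drop ms).take ml →
    ((FULL.drop (pvRunsA l i ml ms).2).take (pvRunsA l i ml ms).1) = pvScanB l best := by
  intro n
  induction n with
  | zero =>
    intro l hlen i ml ms best _ hml hbest
    have : l = [] := List.length_eq_zero_iff.mp (Nat.le_zero.mp hlen)
    subst this; simp [pvRunsA_nil, pvScanB_nil, ← hbest]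
  | succ n ihn =>
    intro l hlen
    have ih : ∀ (l' : List Char), l'.length < l.length → ∀ (i ml ms : Nat) (best : List Char),
        l' = FULL.drop i → ml = best.length → best = (FULL.drop ms).take ml →
        ((FULL.drop (pvRunsA l' i ml ms).2).take (pvRunsA l' i ml ms).1) = pvScanB l' best := by
      intro l' hl'
      exact ihn l' (by omega)
    match l with
    | [] =>
      intro i ml ms best _ hml hbest
      simp [pvRunsA_nil, pvScanB_nil, ← hbest]
    | c :: cs =>
      intro i ml ms best hdrop hml hbest
      by_cases hc : pvKeyB c = true
      · have hcA : pvUpNonVowelA c = true := by rw [← pvKey_eq]; exact hc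
        set R := List.takeWhile pvKeyB (c :: cs) with hR
        set rest := List.dropWhile pvKeyB (c :: cs) with hrest
        have hRA : List.takeWhile pvUpNonVowelA (c :: cs) = R := by rw [hR, pvKey_eq]
        have hrestA : List.dropWhile pvUpNonVowelA (c :: cs) = rest := by rw [hrest, pvKey_eq]
        set k := R.length with hk
        have hkpos : 1 ≤ k := by
          rw [hk, hR]; simp [List.takeWhile, hc]
        have hrest_drop : rest = FULL.drop (i + k) := by
          have h1 : R ++ rest = c :: cs := List.takeWhile_append_dropWhile
          have : rest = (c :: cs).drop k := by
            rw [← h1, hk]; simp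
          rw [this, hdrop, List.drop_drop]
        have hrest_len : rest.length < (c :: cs).length := by
          have h2 : rest.length ≤ cs.length := by
            rw [hrest]
            calc (List.dropWhile pvKeyB (c :: cs)).length
                = (List.dropWhile pvKeyB cs).length := by simp [List.dropWhile, hc]
              _ ≤ cs.length := List.length_dropWhile_le _ _
          simp; omega
        have hRtake : R = (FULL.drop i).take k := by
          have hpre : R <+: (c :: cs) := List.takeWhile_prefix _
          rw [← hdrop, hk]
          exact List.prefix_iff_eq_take.mp hpre
        -- unfold one run step on both sides
        have hrunsA : pvRunsA (c :: cs) i ml ms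
            = pvRunsA rest (i + k) (if k > ml then k else ml) (if k > ml then i else ms) := by
          rw [pvRunsA_cons_pos c cs i ml ms hcA, hRA, hrestA]
        have hscanB : pvScanB (c :: cs) best
            = pvScanB rest (if k > best.length then R else best) := by
          rw [pvScanB_cons_pos c cs best hc, ← hR, ← hrest]
        rw [hrunsA, hscanB]
        by_cases hkg : k > ml
        · have hkg' : k > best.length := by omega
          simp only [if_pos hkg, if_pos hkg']
          exact ih rest hrest_len (i + k) k i R hrest_drop (by omega) hRtake
        · have hkg' : ¬ k > best.length := by omega
          simp only [if_neg hkg, if_neg hkg']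
          exact ih rest hrest_len (i + k) ml ms best hrest_drop hml hbest
      · have hcA : pvUpNonVowelA c = false := by
          rw [← pvKey_eq]; simpa using hc
        have hcs : cs = FULL.drop (i + 1) := by
          have := congrArg List.tail hdrop
          simpa [List.tail_drop] using this
        rw [pvRunsA_cons_neg c cs i ml ms hcA, pvScanB_cons_neg c cs best (by simpa using hc)]
        exact ih cs (by simp) (i + 1) ml ms best hcs hml hbest

-- ===== VERDICT (by name: the statement is the Claim_ definition above) =====
theorem longest_consecutive_uppercase_spec : Claim_equal_longest_consecutive_uppercase := by
  intro s _
  unfold Spec_longest_consecutive_uppercase longest_consecutive_uppercase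
    longest_consecutive_uppercase_alt
  dsimp only
  set l := s.toList with hl
  rw [pvLoopA_eq_runsA_fuel l.length l (le_refl _) 0 0 0 0]
  have hmain := pvRunsA_eq_scanB_fuel l l.length l (le_refl _) 0 0 0 [] (by simp) (by simp) (by simp)
  set st := pvRunsA l 0 0 0 with hst
  rw [PySem.List.slice_natCast_add]
  rw [← hmain]
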